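-- pv_equiv track=rewrite | github.com/RuslanPr0g/Image-Inflator | server/main.py | decompress_image
-- ===== SOURCE A (Python) =====
-- def decompress_image(compressed_data, width, height):
--     """Decompress RLE-compressed image data."""
--     pixels = []
--     i = 0
--     while i < len(compressed_data):
--         run_length = compressed_data[i]
--         rgba = compressed_data[i + 1:i + 5]
--         pixels.extend([rgba] * run_length)
--         i += 5
--
--     return [pixels[i:i + width] for i in range(0, len(pixels), width)]
-- ===== SOURCE B (Python) =====
-- def decompress_image(compressed_data, width, height):
--     """Decompress RLE-compressed image data, building pixel rows in a single pass."""
--     rows = []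
--     row = []
--     for i in range(0, len(compressed_data), 5):
--         rgba = compressed_data[i + 1:i + 5]
--         for _ in range(compressed_data[i]):
--             row.append(rgba)
--             if len(row) == width:
--                 rows.append(row)
--                 row = []
--     if row:
--         rows.append(row)
--     return rows
-- ===== Notes on version B (the rewrite author's own statement) =====
-- stated objective: alternative
-- what changed: A builds one flat pixel list and then chunks it with a second slicing pass; B fuses both phases into a single pass over the runs that appends pixels into a current row and flushes it whenever it reaches width, emitting the short trailing row at the end.
-- outside the precondition, e.g. on decompress_image([2, 1, 2, 3, 4], -1, 1): A returns [], B returns [[[1, 2, 3, 4], [1, 2, 3, 4]]]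
import Mathlib
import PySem

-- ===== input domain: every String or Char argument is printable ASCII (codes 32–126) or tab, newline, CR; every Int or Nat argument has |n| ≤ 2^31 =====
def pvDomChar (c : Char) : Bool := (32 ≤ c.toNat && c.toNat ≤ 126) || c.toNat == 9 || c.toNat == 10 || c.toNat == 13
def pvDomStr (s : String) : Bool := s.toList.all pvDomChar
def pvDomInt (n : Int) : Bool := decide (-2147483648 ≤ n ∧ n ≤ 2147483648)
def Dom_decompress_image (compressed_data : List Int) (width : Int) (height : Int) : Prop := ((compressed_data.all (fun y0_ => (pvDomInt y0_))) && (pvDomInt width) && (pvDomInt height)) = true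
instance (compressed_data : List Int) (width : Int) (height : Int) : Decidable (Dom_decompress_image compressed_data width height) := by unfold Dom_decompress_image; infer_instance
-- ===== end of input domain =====

-- B fuses A's flatten-then-chunk two-phase algorithm into a single pass that builds the rows
-- directly, flushing a row whenever it reaches `width` (same cost class; objective: alternative).

-- ===== PORT A =====
-- A's while-loop: state (i, pixels); pixels.extend([rgba] * run_length); i += 5.
-- fuel = compressed_data.length bounds the iteration count (i grows by 5 each step).
def decompressALoop (compressed_data : List Int) : Nat → Nat → List (List Int) → List (List Int)
  | 0, _, pixels => pixels
  | fuel + 1, i, pixels =>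
    if h : i < compressed_data.length then
      decompressALoop compressed_data fuel (i + 5)
        (pixels ++ List.replicate (compressed_data[i]).toNat
          (PySem.List.slice compressed_data (some ((i : Int) + 1)) (some ((i : Int) + 5))))
    else pixels

def decompress_image (compressed_data : List Int) (width : Int) (height : Int) : List (List (List Int)) :=
  let pixels := decompressALoop compressed_data compressed_data.length 0 []
  (PySem.List.pyRange 0 pixels.length width).map
    (fun i => PySem.List.slice pixels (some i) (some (i + width)))

-- ===== PORT B =====
-- one pixel appended to the current row; flush the row once it reaches width
def pushPixel (width : Int) (st : List (List (List Int)) × List (List Int)) (rgba : List Int) :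
    List (List (List Int)) × List (List Int) :=
  let row := st.2 ++ [rgba]
  if (row.length : Int) = width then (st.1 ++ [row], []) else (st.1, row)

-- B's outer loop over the runs (for i in range(0, len, 5)); the inner `for _ in range(run)`
-- is the foldl over the replicated pixel; fuel as in A's port.
def decompressBLoop (compressed_data : List Int) (width : Int) :
    Nat → Nat → List (List (List Int)) × List (List Int) → List (List (List Int)) × List (List Int)
  | 0, _, st => st
  | fuel + 1, i, st =>
    if h : i < compressed_data.length then
      decompressBLoop compressed_data width fuel (i + 5)
        ((List.replicate (compressed_data[i]).toNat
          (PySem.List.slice compressed_data (some ((i : Int) + 1)) (some ((i : Int) + 5)))).foldl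
          (pushPixel width) st)
    else st

def decompress_image_alt (compressed_data : List Int) (width : Int) (height : Int) : List (List (List Int)) :=
  let st := decompressBLoop compressed_data width compressed_data.length 0 ([], [])
  if st.2 ≠ [] then st.1 ++ [st.2] else st.1

-- ===== PRECONDITION & SPEC =====
-- Pre_ excludes non-positive width: at width == 0 A raises ValueError (range() step zero), and at
-- negative width A's empty result is an accident of range's negative-step semantics on an input
-- outside the natural domain (B instead returns the pixels as one unflushed row there).
def Pre_decompress_image (compressed_data : List Int) (width : Int) (height : Int) : Prop :=
  1 ≤ width
instance (compressed_data : List Int) (width : Int) (height : Int) : Decidable (Pre_decompress_image compressed_data width height) := by unfold Pre_decompress_image; infer_instance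

def pvWitness_decompress_image : List Int × Int × Int := ([2, 1, 2, 3, 4], 2, 1)

def Spec_decompress_image (compressed_data : List Int) (width : Int) (height : Int) (out : List (List (List Int))) : Prop := out = decompress_image_alt compressed_data width height
instance (compressed_data : List Int) (width : Int) (height : Int) (out : List (List (List Int))) : Decidable (Spec_decompress_image compressed_data width height out) := by unfold Spec_decompress_image; infer_instance

-- ===== CLAIM (what is proved, stated in full; the proofs are below) =====
def Claim_equal_decompress_image : Prop := ∀ (compressed_data : List Int) (width : Int) (height : Int), Dom_decompress_image compressed_data width height → Pre_decompress_image compressed_data width height → Spec_decompress_image compressed_data width height (decompress_image compressed_data width height)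


-- ===== LEMMAS AND PROOFS =====

-- the flat pixel list A's while-loop produces from offset i onwards
def flatFrom (compressed_data : List Int) (i : Nat) : List (List Int) :=
  if h : i < compressed_data.length then
    List.replicate (compressed_data[i]).toNat
      (PySem.List.slice compressed_data (some ((i : Int) + 1)) (some ((i : Int) + 5)))
      ++ flatFrom compressed_data (i + 5)
  else []
termination_by compressed_data.length - i

lemma flatFrom_stop {compressed_data : List Int} {i : Nat} (h : compressed_data.length ≤ i) :
    flatFrom compressed_data i = [] := by
  rw [flatFrom, dif_neg (by omega)]

lemma decompressALoop_flat (compressed_data : List Int) :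
    ∀ fuel i pixels, compressed_data.length ≤ i + 5 * fuel →
      decompressALoop compressed_data fuel i pixels = pixels ++ flatFrom compressed_data i := by
  intro fuel
  induction fuel with
  | zero =>
    intro i pixels h
    rw [decompressALoop, flatFrom_stop (by omega), List.append_nil]
  | succ fuel ih =>
    intro i pixels h
    rw [decompressALoop]
    by_cases hi : i < compressed_data.length
    · rw [dif_pos hi, ih (i + 5) _ (by omega)]
      conv_rhs => rw [flatFrom]
      rw [dif_pos hi, List.append_assoc]
    · rw [dif_neg hi]
      rw [flatFrom_stop (by omega), List.append_nil]

lemma decompressBLoop_foldl (compressed_data : List Int) (width : Int) :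
    ∀ fuel i st, compressed_data.length ≤ i + 5 * fuel →
      decompressBLoop compressed_data width fuel i st =
        (flatFrom compressed_data i).foldl (pushPixel width) st := by
  intro fuel
  induction fuel with
  | zero =>
    intro i st h
    rw [decompressBLoop, flatFrom_stop (by omega)]
    rfl
  | succ fuel ih =>
    intro i st h
    rw [decompressBLoop]
    by_cases hi : i < compressed_data.length
    · rw [dif_pos hi, ih (i + 5) _ (by omega)]
      conv_rhs => rw [flatFrom]
      rw [dif_pos hi, List.foldl_append]
    · rw [dif_neg hi, flatFrom_stop (by omega)]
      rfl

-- reference chunking: rows of width w+1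
def chunkRows (w : Nat) (xs : List (List Int)) : List (List (List Int)) :=
  match xs with
  | [] => []
  | x :: rest => ((x :: rest).take (w + 1)) :: chunkRows w (rest.drop w)
termination_by xs.length
decreasing_by simp only [List.length_cons, List.length_drop]; omega

lemma chunkRows_nil (w : Nat) : chunkRows w [] = [] := by
  unfold chunkRows
  rfl

lemma chunkRows_cons (w : Nat) (x : List Int) (rest : List (List Int)) :
    chunkRows w (x :: rest) = ((x :: rest).take (w + 1)) :: chunkRows w (rest.drop w) := by
  conv_lhs => unfold chunkRows

lemma chunkRows_ne_nil {w : Nat} {xs : List (List Int)} (h : xs ≠ []) :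
    chunkRows w xs = xs.take (w + 1) :: chunkRows w (xs.drop (w + 1)) := by
  cases xs with
  | nil => exact absurd rfl h
  | cons x rest => rw [chunkRows_cons, List.drop_succ_cons]

lemma chunkRows_short {w : Nat} {xs : List (List Int)} (h : xs.length < w + 1) (hne : xs ≠ []) :
    chunkRows w xs = [xs] := by
  rw [chunkRows_ne_nil hne, List.take_of_length_le (by omega), List.drop_eq_nil_of_le (by omega),
    chunkRows_nil]

-- flushing the final partial row (the `if row:` at the end of B)
def flushRow (st : List (List (List Int)) × List (List Int)) : List (List (List Int)) :=
  if st.2 ≠ [] then st.1 ++ [st.2] else st.1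

lemma foldl_pushPixel_chunk (W : Int) (hW : 1 ≤ W) :
    ∀ (xs : List (List Int)) (rows : List (List (List Int))) (acc : List (List Int)),
      acc.length < W.toNat →
      flushRow (xs.foldl (pushPixel W) (rows, acc)) = rows ++ chunkRows (W.toNat - 1) (acc ++ xs) := by
  intro xs
  induction xs with
  | nil =>
    intro rows acc hacc
    by_cases hne : acc = []
    · subst hne
      simp [flushRow, chunkRows_nil]
    · rw [List.foldl_nil, List.append_nil, chunkRows_short (by omega) hne, flushRow]
      simp [hne]
  | cons x xs ih =>
    intro rows acc hacc
    simp only [List.foldl_cons]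
    rw [pushPixel]
    simp only
    by_cases hfull : (((acc ++ [x]).length : Nat) : Int) = W
    · rw [if_pos hfull]
      have hlen : (acc ++ [x]).length = W.toNat := by
        simp only [List.length_append, List.length_cons, List.length_nil] at hfull ⊢
        omega
      rw [ih (rows ++ [acc ++ [x]]) [] (by simp; omega)]
      have hne2 : (acc ++ [x]) ++ xs ≠ [] := by
        intro hc
        have hl := congrArg List.length hc
        simp at hl
      have hsplit : acc ++ x :: xs = (acc ++ [x]) ++ xs := by simp
      have hW1 : W.toNat - 1 + 1 = W.toNat := by omega
      rw [hsplit, chunkRows_ne_nil hne2, hW1, List.take_left' hlen, List.drop_left' hlen]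
      simp
    · rw [if_neg hfull]
      have hlt : (acc ++ [x]).length < W.toNat := by
        simp only [List.length_append, List.length_cons, List.length_nil] at hfull ⊢
        omega
      rw [ih rows (acc ++ [x]) hlt]
      simp

-- step-cons lemma for a positive-step range
lemma pyRange_pos_cons {a b W : Int} (hW : 0 < W) (hab : a < b) :
    PySem.List.pyRange a b W = a :: PySem.List.pyRange (a + W) b W := by
  rw [PySem.List.pyRange_of_pos a b hW, PySem.List.pyRange_of_pos (a + W) b hW, if_pos hab]
  by_cases h2 : a + W < b
  · rw [if_pos h2]
    have hdiv : (b - a + W - 1) / W = (b - (a + W) + W - 1) / W + 1 := by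
      have harith : b - a + W - 1 = (b - (a + W) + W - 1) + 1 * W := by ring
      rw [harith, Int.add_mul_ediv_right _ _ (by omega : W ≠ 0)]
    have hnn : 0 ≤ (b - (a + W) + W - 1) / W := Int.ediv_nonneg (by omega) (by omega)
    have hcnt : ((b - a + W - 1) / W).toNat = ((b - (a + W) + W - 1) / W).toNat + 1 := by omega
    rw [hcnt, List.range_succ_eq_map, List.map_cons, List.map_map]
    congr 1
    · simp
    · apply List.map_congr_left
      intro k _
      simp only [Function.comp]
      push_cast
      ring
  · rw [if_neg h2]
    have h1 : (b - a + W - 1) / W = 1 := by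
      have hle : 1 ≤ (b - a + W - 1) / W := by
        rw [Int.le_ediv_iff_mul_le hW]; omega
      have hlt : (b - a + W - 1) / W < 2 := by
        rw [Int.ediv_lt_iff_lt_mul hW]; omega
      omega
    rw [h1]
    simp

-- shift a positive-step range to start at 0
lemma pyRange_pos_shift (a b W : Int) (hW : 0 < W) :
    PySem.List.pyRange a b W = (PySem.List.pyRange 0 (b - a) W).map (fun k => k + a) := by
  rw [PySem.List.pyRange_of_pos a b hW, PySem.List.pyRange_of_pos 0 (b - a) hW, List.map_map]
  have hcnt : (if (0:Int) < b - a then ((b - a - 0 + W - 1) / W).toNat else 0)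
      = (if a < b then ((b - a + W - 1) / W).toNat else 0) := by
    by_cases hab : a < b
    · rw [if_pos (by omega : (0:Int) < b - a), if_pos hab]
      norm_num
    · rw [if_neg (by omega : ¬ (0:Int) < b - a), if_neg hab]
  rw [hcnt]
  apply List.map_congr_left
  intro k _
  simp only [Function.comp]
  ring

lemma pyRange_pos_nil {a b W : Int} (hW : 0 < W) (h : b ≤ a) :
    PySem.List.pyRange a b W = [] := by
  rw [PySem.List.pyRange_of_pos a b hW, if_neg (by omega : ¬ a < b)]
  simp

-- A's chunking comprehension equals the reference chunking, for positive width
lemma mapSlice_chunk (W : Int) (hW : 1 ≤ W) :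
    ∀ n (pixels : List (List Int)), pixels.length ≤ n →
      (PySem.List.pyRange 0 pixels.length W).map
        (fun i => PySem.List.slice pixels (some i) (some (i + W)))
        = chunkRows (W.toNat - 1) pixels := by
  have hW0 : (0:Int) < W := by omega
  intro n
  induction n with
  | zero =>
    intro pixels h
    have hnil : pixels = [] := by cases pixels with
      | nil => rfl
      | cons _ _ => simp at h
    subst hnil
    simp [pyRange_pos_nil hW0 le_rfl, chunkRows_nil]
  | succ n ih =>
    intro pixels hlen
    by_cases hnil : pixels = []
    · subst hnil
      simp [pyRange_pos_nil hW0 le_rfl, chunkRows_nil]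
    · have hpos : 0 < pixels.length := by
        cases pixels with
        | nil => exact absurd rfl hnil
        | cons _ _ => simp
      have hcast : (0:Int) < (pixels.length : Int) := by exact_mod_cast hpos
      rw [pyRange_pos_cons hW0 hcast]
      simp only [List.map_cons, zero_add, PySem.List.slice_zero_start]
      rw [PySem.List.slice_to pixels (by omega : (0:Int) ≤ W)]
      have htail :
          (PySem.List.pyRange W (pixels.length : Int) W).map
            (fun i => PySem.List.slice pixels (some i) (some (i + W)))
            = (PySem.List.pyRange 0 (((pixels.drop W.toNat).length : Nat) : Int) W).map
                (fun i => PySem.List.slice (pixels.drop W.toNat) (some i) (some (i + W))) := by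
        rw [pyRange_pos_shift W (pixels.length : Int) W hW0, List.map_map]
        have hlen2 : PySem.List.pyRange 0 ((pixels.length : Int) - W) W
            = PySem.List.pyRange 0 (((pixels.drop W.toNat).length : Nat) : Int) W := by
          by_cases hge : W.toNat ≤ pixels.length
          · have he : (((pixels.drop W.toNat).length : Nat) : Int) = (pixels.length : Int) - W := by
              rw [List.length_drop]
              omega
            rw [he]
          · rw [pyRange_pos_nil hW0 (by omega : (pixels.length : Int) - W ≤ 0),
              pyRange_pos_nil hW0 (by rw [List.length_drop]; omega)]
        rw [hlen2]
        apply List.map_congr_left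
        intro k hk
        have hk0 : 0 ≤ k :=
          ((PySem.List.mem_pyRange_iff_of_pos hW0 k).mp hk).1
        simp only [Function.comp]
        rw [PySem.List.slice_toNat pixels (by omega : (0:Int) ≤ k + W) (by omega : (0:Int) ≤ k + W + W),
          PySem.List.slice_toNat (pixels.drop W.toNat) hk0 (by omega : (0:Int) ≤ k + W),
          List.drop_drop]
        have e2 : (k + W + W).toNat - (k + W).toNat = (k + W).toNat - k.toNat := by omega
        have e1 : (k + W).toNat = k.toNat + W.toNat := by omega
        rw [e2, e1, Nat.add_comm k.toNat W.toNat]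
      rw [htail, ih (pixels.drop W.toNat) (by rw [List.length_drop]; omega)]
      rw [chunkRows_ne_nil hnil]
      have hW1 : W.toNat - 1 + 1 = W.toNat := by omega
      rw [hW1]

-- ===== VERDICT (by name: the statement is the Claim_ definition above) =====
theorem decompress_image_spec : Claim_equal_decompress_image := by
  intro compressed_data width height _ hpre
  have hW : 1 ≤ width := hpre
  unfold Spec_decompress_image decompress_image decompress_image_alt
  simp only
  rw [decompressALoop_flat compressed_data compressed_data.length 0 [] (by omega),
    decompressBLoop_foldl compressed_data width compressed_data.length 0 ([], []) (by omega),
    List.nil_append]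
  have hf := foldl_pushPixel_chunk width hW (flatFrom compressed_data 0) [] []
    (by simp; omega)
  rw [flushRow] at hf
  simp only [List.nil_append] at hf
  rw [hf, mapSlice_chunk width hW (flatFrom compressed_data 0).length (flatFrom compressed_data 0) le_rfl]
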